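-- pv_equiv track=rewrite | github.com/NewNLPer/nlp_Learnning | daily learn/7.6.py | star_pan
-- ===== SOURCE A (Python) =====
-- def star_pan(s1,s2):
--     if abs(len(s1)-len(s2))>=2 or abs(len(s1)-len(s2))==0:
--         return False
--     else:
--         start_zhen1=0
--         start_zhen2=0
--         while start_zhen1<len(s1) and start_zhen2<len(s2):
--             if s1[start_zhen1]==s2[start_zhen2]:
--                 start_zhen1+=1
--                 start_zhen2+=1
--             else:
--                 start_zhen2+=1
--         return start_zhen1==len(s1)
-- ===== SOURCE B (Python) =====
-- def star_pan(s1, s2):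
--     if len(s2) - len(s1) != 1:
--         return False
--     for i in range(len(s1)):
--         if s1[i] != s2[i]:
--             return s1[i:] == s2[i+1:]
--     return True
-- ===== Notes on version B (the rewrite author's own statement) =====
-- stated objective: simpler
-- what changed: Replaces the greedy two-pointer scan (advancing only the s2 pointer on mismatch) with a directional length guard, a prefix scan to the first mismatch, and a single suffix slice comparison.
import Mathlib
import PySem

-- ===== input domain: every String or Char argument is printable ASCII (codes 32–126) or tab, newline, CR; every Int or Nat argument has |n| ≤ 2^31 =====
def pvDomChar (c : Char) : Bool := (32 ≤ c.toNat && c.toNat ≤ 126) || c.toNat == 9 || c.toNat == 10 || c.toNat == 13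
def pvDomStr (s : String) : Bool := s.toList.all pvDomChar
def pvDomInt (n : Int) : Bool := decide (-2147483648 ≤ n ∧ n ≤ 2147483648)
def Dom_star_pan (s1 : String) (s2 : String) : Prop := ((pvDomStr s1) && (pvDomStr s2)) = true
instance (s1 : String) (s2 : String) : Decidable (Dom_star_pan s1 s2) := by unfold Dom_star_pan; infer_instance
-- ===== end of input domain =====

-- B replaces A's greedy two-pointer scan with a length guard, a prefix scan to the
-- first mismatch and one suffix slice comparison (objective: simpler).

-- ===== PORT A =====
-- A's while loop with the two pointers start_zhen1/start_zhen2; in-range indexing via getD.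
def starPanLoop (l1 l2 : List Char) (z1 z2 : Nat) : Bool :=
  if z1 < l1.length ∧ z2 < l2.length then
    if l1.getD z1 ' ' == l2.getD z2 ' ' then starPanLoop l1 l2 (z1 + 1) (z2 + 1)
    else starPanLoop l1 l2 z1 (z2 + 1)
  else z1 == l1.length
termination_by l2.length - z2
decreasing_by all_goals omega

def star_pan (s1 : String) (s2 : String) : Bool :=
  let l1 := s1.toList
  let l2 := s2.toList
  if ((l1.length : Int) - l2.length).natAbs ≥ 2 ∨ ((l1.length : Int) - l2.length).natAbs = 0 then
    false
  else
    starPanLoop l1 l2 0 0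

-- ===== PORT B =====
-- B's for loop over range(len(s1)); s1[i:] / s2[i+1:] are List.drop (exact for 0 ≤ i ≤ len).
def starPanAltLoop (l1 l2 : List Char) (i : Nat) : Bool :=
  if i < l1.length then
    if l1.getD i ' ' == l2.getD i ' ' then starPanAltLoop l1 l2 (i + 1)
    else decide (l1.drop i = l2.drop (i + 1))
  else true
termination_by l1.length - i
decreasing_by omega

def star_pan_alt (s1 : String) (s2 : String) : Bool :=
  let l1 := s1.toList
  let l2 := s2.toList
  if (l2.length : Int) - l1.length ≠ 1 then false
  else starPanAltLoop l1 l2 0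

-- ===== PRECONDITION & SPEC =====
def Spec_star_pan (s1 : String) (s2 : String) (out : Bool) : Prop := out = star_pan_alt s1 s2
instance (s1 : String) (s2 : String) (out : Bool) : Decidable (Spec_star_pan s1 s2 out) := by unfold Spec_star_pan; infer_instance

-- ===== CLAIM (what is proved, stated in full; the proofs are below) =====
def Claim_equal_star_pan : Prop := ∀ (s1 : String) (s2 : String), Dom_star_pan s1 s2 → Spec_star_pan s1 s2 (star_pan s1 s2)

-- ===== LEMMAS AND PROOFS =====

-- When s1's remaining part is strictly longer than s2's, the pointer z1 can never
-- reach len(s1) (it advances at most as fast as z2), so A's loop returns false.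
theorem starPanLoop_false (l1 l2 : List Char) (z1 z2 : Nat)
    (hgap : l2.length + z1 < l1.length + z2) (hz2 : z2 ≤ l2.length) :
    starPanLoop l1 l2 z1 z2 = false := by
  rw [starPanLoop]
  split
  · rename_i h
    split
    · exact starPanLoop_false l1 l2 (z1 + 1) (z2 + 1) (by omega) (by omega)
    · exact starPanLoop_false l1 l2 z1 (z2 + 1) (by omega) (by omega)
  · rename_i h
    simp only [not_and, not_lt] at h
    have : z1 ≠ l1.length := by omega
    simp [this]
termination_by l2.length - z2
decreasing_by all_goals omega

-- When the remaining parts have equal length, A's loop is positionwise equality,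
-- i.e. equality of the two suffixes.
theorem starPanLoop_eq_drop (l1 l2 : List Char) (z1 z2 : Nat)
    (hlen : l1.length + z2 = l2.length + z1) (h1 : z1 ≤ l1.length) (h2 : z2 ≤ l2.length) :
    starPanLoop l1 l2 z1 z2 = decide (l1.drop z1 = l2.drop z2) := by
  rw [starPanLoop]
  by_cases hlt : z1 < l1.length
  · have hlt2 : z2 < l2.length := by omega
    simp only [hlt, hlt2, and_self, if_true]
    have hd1 : l1.drop z1 = l1[z1] :: l1.drop (z1 + 1) := List.drop_eq_getElem_cons hlt
    have hd2 : l2.drop z2 = l2[z2] :: l2.drop (z2 + 1) := List.drop_eq_getElem_cons hlt2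
    have hg1 : l1.getD z1 ' ' = l1[z1] := List.getD_eq_getElem l1 ' ' hlt
    have hg2 : l2.getD z2 ' ' = l2[z2] := List.getD_eq_getElem l2 ' ' hlt2
    by_cases hc : l1[z1] = l2[z2]
    · rw [hg1, hg2]
      simp only [hc, beq_self_eq_true, if_true]
      rw [starPanLoop_eq_drop l1 l2 (z1 + 1) (z2 + 1) (by omega) (by omega) (by omega)]
      rw [decide_eq_decide]
      constructor
      · intro h
        rw [hd1, hd2, hc, h]
      · intro h
        rw [hd1, hd2, List.cons.injEq] at h
        exact h.2
    · rw [hg1, hg2]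
      have hne : (l1[z1] == l2[z2]) = false := beq_eq_false_iff_ne.mpr hc
      simp only [hne, Bool.false_eq_true, if_false]
      rw [starPanLoop_false l1 l2 z1 (z2 + 1) (by omega) (by omega)]
      have hnd : ¬ (l1.drop z1 = l2.drop z2) := by
        intro h
        rw [hd1, hd2, List.cons.injEq] at h
        exact hc h.1
      simp [hnd]
  · have hz1 : z1 = l1.length := by omega
    have hz2' : z2 = l2.length := by omega
    simp only [hlt, false_and, if_false]
    simp [hz1, hz2', List.drop_length]
termination_by l1.length - z1
decreasing_by all_goals omega

-- On equal remaining lengths B's prefix-scan loop equals A's loop behaviour too.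
theorem starPanAltLoop_eq (l1 l2 : List Char) (i : Nat)
    (hlen : l2.length = l1.length + 1) (hi : i ≤ l1.length) :
    starPanAltLoop l1 l2 i = starPanLoop l1 l2 i i := by
  rw [starPanAltLoop, starPanLoop]
  by_cases hlt : i < l1.length
  · have hlt2 : i < l2.length := by omega
    simp only [hlt, hlt2, and_self, if_true]
    by_cases hc : l1.getD i ' ' = l2.getD i ' '
    · simp only [hc, beq_self_eq_true, if_true]
      exact starPanAltLoop_eq l1 l2 (i + 1) hlen (by omega)
    · have hne : (l1.getD i ' ' == l2.getD i ' ') = false := beq_eq_false_iff_ne.mpr hc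
      simp only [hne, Bool.false_eq_true, if_false]
      rw [starPanLoop_eq_drop l1 l2 i (i + 1) (by omega) (by omega) (by omega)]
  · simp only [hlt, false_and, if_false]
    have : i = l1.length := by omega
    simp [this]
termination_by l1.length - i
decreasing_by omega

-- ===== VERDICT (by name: the statement is the Claim_ definition above) =====
theorem star_pan_spec : Claim_equal_star_pan := by
  intro s1 s2 _
  unfold Spec_star_pan star_pan star_pan_alt
  set l1 := s1.toList
  set l2 := s2.toList
  by_cases hg : ((l1.length : Int) - l2.length).natAbs ≥ 2 ∨ ((l1.length : Int) - l2.length).natAbs = 0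
  · have hb : (l2.length : Int) - l1.length ≠ 1 := by omega
    rw [if_pos hg, if_pos hb]
  · -- |len1 - len2| = 1
    have h1 : l1.length = l2.length + 1 ∨ l2.length = l1.length + 1 := by omega
    rcases h1 with h | h
    · have hb : (l2.length : Int) - l1.length ≠ 1 := by omega
      rw [if_neg hg, if_pos hb]
      exact starPanLoop_false l1 l2 0 0 (by omega) (by omega)
    · have hb : ¬ ((l2.length : Int) - l1.length ≠ 1) := by omega
      rw [if_neg hg, if_neg hb]
      exact (starPanAltLoop_eq l1 l2 0 h (by omega)).symm
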